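-- pv_equiv track=rewrite | github.com/nixternal/CodingChallenges | AdventOfCode/2016/02.py | part_one
-- ===== SOURCE A (Python) =====
-- def part_one(data: list) -> str:
--     # Define the keypad layout
--     keypad = [
--         ['1', '2', '3'],
--         ['4', '5', '6'],
--         ['7', '8', '9']
--     ]
--
--     # Initialize the starting position
--     x, y = 1, 1
--
--     # Initialize an empty password
--     password = ''
--
--     #                   LEFT        RIGHT           UP          DOWN
--     directions = {'L': (0, -1), 'R': (0, 1), 'U': (-1, 0), 'D': (1, 0)}
--
--     for commands in data:
--         for cmd in commands:
--             # Calculate the new position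
--             dx, dy = directions.get(cmd, (0, 0))
--             new_x, new_y = x + dx, y + dy
--
--             # Check if the new position is within bounds
--             if 0 <= new_x < 3 and 0 <= new_y < 3:
--                 x, y = new_x, new_y
--
--         # Append the corresponding keypad value to the password
--         password += keypad[x][y]
--
--     return password
-- ===== SOURCE B (Python) =====
-- def part_one(data: list) -> str:
--     # Transition table: (current key, command) -> next key; moves off the pad stay put.
--     trans = {
--     ('1', 'U'): '1',
--     ('1', 'D'): '4',
--     ('1', 'L'): '1',
--     ('1', 'R'): '2',
--     ('2', 'U'): '2',
--     ('2', 'D'): '5',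
--     ('2', 'L'): '1',
--     ('2', 'R'): '3',
--     ('3', 'U'): '3',
--     ('3', 'D'): '6',
--     ('3', 'L'): '2',
--     ('3', 'R'): '3',
--     ('4', 'U'): '1',
--     ('4', 'D'): '7',
--     ('4', 'L'): '4',
--     ('4', 'R'): '5',
--     ('5', 'U'): '2',
--     ('5', 'D'): '8',
--     ('5', 'L'): '4',
--     ('5', 'R'): '6',
--     ('6', 'U'): '3',
--     ('6', 'D'): '9',
--     ('6', 'L'): '5',
--     ('6', 'R'): '6',
--     ('7', 'U'): '4',
--     ('7', 'D'): '7',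
--     ('7', 'L'): '7',
--     ('7', 'R'): '8',
--     ('8', 'U'): '5',
--     ('8', 'D'): '8',
--     ('8', 'L'): '7',
--     ('8', 'R'): '9',
--     ('9', 'U'): '6',
--     ('9', 'D'): '9',
--     ('9', 'L'): '8',
--     ('9', 'R'): '9',
--     }
--     cur = '5'
--     password = ''
--     for commands in data:
--         for cmd in commands:
--             cur = trans.get((cur, cmd), cur)
--         password += cur
--     return password
-- ===== Notes on version B (the rewrite author's own statement) =====
-- stated objective: idiomatic
-- what changed: Replaces A's (x,y) coordinate simulation with bounds checks by a precomputed (key, command) -> key transition dictionary over the keypad characters, with off-pad moves as self-loops and unknown commands handled by dict.get's default.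
import Mathlib
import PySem

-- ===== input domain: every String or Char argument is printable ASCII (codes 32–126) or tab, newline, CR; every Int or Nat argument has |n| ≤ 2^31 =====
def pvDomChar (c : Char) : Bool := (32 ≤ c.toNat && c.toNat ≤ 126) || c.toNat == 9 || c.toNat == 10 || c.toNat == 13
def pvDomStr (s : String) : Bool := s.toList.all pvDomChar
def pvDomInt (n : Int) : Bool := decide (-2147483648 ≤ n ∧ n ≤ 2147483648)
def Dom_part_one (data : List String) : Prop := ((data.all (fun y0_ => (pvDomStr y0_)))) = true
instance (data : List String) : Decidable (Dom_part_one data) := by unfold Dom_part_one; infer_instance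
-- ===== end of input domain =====

-- B replaces A's coordinate simulation with a precomputed (key, command) -> key transition
-- dictionary over the keypad characters themselves (objective: idiomatic; not faster).

-- ===== PORT A =====
def keypadA : List (List String) := [["1", "2", "3"], ["4", "5", "6"], ["7", "8", "9"]]

def directionsA : PySem.Dict Char (Int × Int) :=
  PySem.Dict.ofList [('L', (0, -1)), ('R', (0, 1)), ('U', (-1, 0)), ('D', (1, 0))]

-- the body of A's inner loop: move if the new position is within bounds
def stepA (st : Int × Int) (cmd : Char) : Int × Int :=
  let d := directionsA.getD cmd (0, 0)
  let nx := st.1 + d.1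
  let ny := st.2 + d.2
  if 0 ≤ nx ∧ nx < 3 ∧ 0 ≤ ny ∧ ny < 3 then (nx, ny) else st

def part_one (data : List String) : String :=
  (data.foldl
    (fun (acc : (Int × Int) × String) commands =>
      let st := commands.toList.foldl stepA acc.1
      (st, acc.2 ++ PySem.List.pyGetD (PySem.List.pyGetD keypadA st.1 []) st.2 ""))
    ((1, 1), "")).2

-- ===== PORT B =====
-- the literal transition table from Source B
def transB : PySem.Dict (Char × Char) Char :=
  PySem.Dict.ofList
    [ (('1', 'U'), '1'),
    (('1', 'D'), '4'),
    (('1', 'L'), '1'),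
    (('1', 'R'), '2'),
    (('2', 'U'), '2'),
    (('2', 'D'), '5'),
    (('2', 'L'), '1'),
    (('2', 'R'), '3'),
    (('3', 'U'), '3'),
    (('3', 'D'), '6'),
    (('3', 'L'), '2'),
    (('3', 'R'), '3'),
    (('4', 'U'), '1'),
    (('4', 'D'), '7'),
    (('4', 'L'), '4'),
    (('4', 'R'), '5'),
    (('5', 'U'), '2'),
    (('5', 'D'), '8'),
    (('5', 'L'), '4'),
    (('5', 'R'), '6'),
    (('6', 'U'), '3'),
    (('6', 'D'), '9'),
    (('6', 'L'), '5'),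
    (('6', 'R'), '6'),
    (('7', 'U'), '4'),
    (('7', 'D'), '7'),
    (('7', 'L'), '7'),
    (('7', 'R'), '8'),
    (('8', 'U'), '5'),
    (('8', 'D'), '8'),
    (('8', 'L'), '7'),
    (('8', 'R'), '9'),
    (('9', 'U'), '6'),
    (('9', 'D'), '9'),
    (('9', 'L'), '8'),
    (('9', 'R'), '9') ]

def stepB (cur : Char) (cmd : Char) : Char := transB.getD (cur, cmd) cur

def part_one_alt (data : List String) : String :=
  (data.foldl
    (fun (acc : Char × String) commands =>
      let cur := commands.toList.foldl stepB acc.1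
      (cur, acc.2 ++ String.mk [cur]))
    ('5', "")).2

-- ===== PRECONDITION & SPEC =====
def Spec_part_one (data : List String) (out : String) : Prop := out = part_one_alt data
instance (data : List String) (out : String) : Decidable (Spec_part_one data out) := by unfold Spec_part_one; infer_instance

-- ===== CLAIM (what is proved, stated in full; the proofs are below) =====
def Claim_equal_part_one : Prop := ∀ (data : List String), Dom_part_one data → Spec_part_one data (part_one data)

-- ===== LEMMAS AND PROOFS =====

set_option maxRecDepth 4000

-- the transition table as a literal item list (for lemmas about lookups with a free key)
def transLit : List ((Char × Char) × Char) :=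
  [ (('1', 'U'), '1'),
    (('1', 'D'), '4'),
    (('1', 'L'), '1'),
    (('1', 'R'), '2'),
    (('2', 'U'), '2'),
    (('2', 'D'), '5'),
    (('2', 'L'), '1'),
    (('2', 'R'), '3'),
    (('3', 'U'), '3'),
    (('3', 'D'), '6'),
    (('3', 'L'), '2'),
    (('3', 'R'), '3'),
    (('4', 'U'), '1'),
    (('4', 'D'), '7'),
    (('4', 'L'), '4'),
    (('4', 'R'), '5'),
    (('5', 'U'), '2'),
    (('5', 'D'), '8'),
    (('5', 'L'), '4'),
    (('5', 'R'), '6'),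
    (('6', 'U'), '3'),
    (('6', 'D'), '9'),
    (('6', 'L'), '5'),
    (('6', 'R'), '6'),
    (('7', 'U'), '4'),
    (('7', 'D'), '7'),
    (('7', 'L'), '7'),
    (('7', 'R'), '8'),
    (('8', 'U'), '5'),
    (('8', 'D'), '8'),
    (('8', 'L'), '7'),
    (('8', 'R'), '9'),
    (('9', 'U'), '6'),
    (('9', 'D'), '9'),
    (('9', 'L'), '8'),
    (('9', 'R'), '9') ]

-- the correspondence between A's coordinates and B's key character
def pvBounds (p : Int × Int) : Prop := 0 ≤ p.1 ∧ p.1 < 3 ∧ 0 ≤ p.2 ∧ p.2 < 3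

def pvKeyAt (p : Int × Int) : Char := Char.ofNat (49 + (3 * p.1 + p.2).toNat)

theorem pv_step_eq (p : Int × Int) (c : Char) (h : pvBounds p) :
    pvBounds (stepA p c) ∧ stepB (pvKeyAt p) c = pvKeyAt (stepA p c) := by
  obtain ⟨x, y⟩ := p
  obtain ⟨h1, h2, h3, h4⟩ := h
  by_cases hc : c = 'U' ∨ c = 'D' ∨ c = 'L' ∨ c = 'R'
  · have hx : x = 0 ∨ x = 1 ∨ x = 2 := by omega
    have hy : y = 0 ∨ y = 1 ∨ y = 2 := by omega
    rcases hx with rfl | rfl | rfl <;> rcases hy with rfl | rfl | rfl <;>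
      rcases hc with rfl | rfl | rfl | rfl <;>
      exact ⟨by unfold pvBounds stepA; decide, by decide⟩
  · push_neg at hc
    obtain ⟨hU, hD, hL, hR⟩ := hc
    have hdir : directionsA.getD c (0, 0) = (0, 0) := by
      have e : directionsA = PySem.Dict.mk [('L', (0, -1)), ('R', (0, 1)), ('U', (-1, 0)), ('D', (1, 0))] := by decide
      rw [PySem.Dict.getD_eq_get?_getD, e]
      simp [PySem.Dict.get?_mk_cons, PySem.Dict.get?, Ne.symm hU, Ne.symm hD, Ne.symm hL, Ne.symm hR]
    have htr : transB.getD (pvKeyAt (x, y), c) (pvKeyAt (x, y)) = pvKeyAt (x, y) := by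
      have e : transB = PySem.Dict.mk transB.items := by
        apply PySem.Dict.ext; rfl
      rw [PySem.Dict.getD_eq_get?_getD, e]
      have eit : transB.items = transLit := by decide
      rw [eit]
      simp [transLit, PySem.Dict.get?_mk_cons, PySem.Dict.get?, Prod.ext_iff,
        Ne.symm hU, Ne.symm hD, Ne.symm hL, Ne.symm hR]
    have hA : stepA (x, y) c = (x, y) := by
      unfold stepA; rw [hdir]; simp
    rw [hA]
    exact ⟨⟨h1, h2, h3, h4⟩, htr⟩

theorem pv_foldl_eq (cs : List Char) (p : Int × Int) (h : pvBounds p) :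
    pvBounds (cs.foldl stepA p) ∧ cs.foldl stepB (pvKeyAt p) = pvKeyAt (cs.foldl stepA p) := by
  induction cs generalizing p with
  | nil => exact ⟨h, rfl⟩
  | cons c cs ih =>
    obtain ⟨hb, he⟩ := pv_step_eq p c h
    simpa [List.foldl_cons, he] using ih (stepA p c) hb

theorem pv_keypad_at (p : Int × Int) (h : pvBounds p) :
    PySem.List.pyGetD (PySem.List.pyGetD keypadA p.1 []) p.2 "" = String.mk [pvKeyAt p] := by
  obtain ⟨x, y⟩ := p
  obtain ⟨h1, h2, h3, h4⟩ := h
  have hx : x = 0 ∨ x = 1 ∨ x = 2 := by omega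
  have hy : y = 0 ∨ y = 1 ∨ y = 2 := by omega
  rcases hx with rfl | rfl | rfl <;> rcases hy with rfl | rfl | rfl <;> decide

theorem pv_outer_eq (data : List String) (p : Int × Int) (s : String) (h : pvBounds p) :
    (data.foldl
      (fun (acc : (Int × Int) × String) commands =>
        let st := commands.toList.foldl stepA acc.1
        (st, acc.2 ++ PySem.List.pyGetD (PySem.List.pyGetD keypadA st.1 []) st.2 ""))
      (p, s)).2 =
    (data.foldl
      (fun (acc : Char × String) commands =>
        let cur := commands.toList.foldl stepB acc.1
        (cur, acc.2 ++ String.mk [cur]))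
      (pvKeyAt p, s)).2 := by
  induction data generalizing p s with
  | nil => rfl
  | cons commands rest ih =>
    obtain ⟨hb, he⟩ := pv_foldl_eq commands.toList p h
    simp only [List.foldl_cons, he, pv_keypad_at _ hb]
    exact ih (commands.toList.foldl stepA p) _ hb

-- ===== VERDICT (by name: the statement is the Claim_ definition above) =====
theorem part_one_spec : Claim_equal_part_one := by
  intro data _
  show part_one data = part_one_alt data
  unfold part_one part_one_alt
  have h5 : pvKeyAt (1, 1) = '5' := by decide
  have hb : pvBounds (1, 1) := by unfold pvBounds; norm_num
  simpa [h5] using pv_outer_eq data (1, 1) "" hb
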